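-- pv_equiv track=rewrite | github.com/barthayal/barcode_extrater | combine_barcodes.py | all_disjoint
-- ===== SOURCE A (Python) =====
-- def all_disjoint(sets):
--     all = set()
--     for s in sets:
--         for x in s:
--             if x in all:
--                 return False
--             all.add(x)
--     return True
-- ===== SOURCE B (Python) =====
-- def all_disjoint(sets):
--     sets = list(sets)
--     total = sum(len(s) for s in sets)
--     u = set()
--     for s in sets:
--         u.update(s)
--     return total == len(u)
-- ===== Notes on version B (the rewrite author's own statement) =====
-- stated objective: simpler
-- what changed: Replaces A's element-by-element membership test with early return by two whole-collection passes: compare the total element count with the size of the union of all the sets.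
import Mathlib
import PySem

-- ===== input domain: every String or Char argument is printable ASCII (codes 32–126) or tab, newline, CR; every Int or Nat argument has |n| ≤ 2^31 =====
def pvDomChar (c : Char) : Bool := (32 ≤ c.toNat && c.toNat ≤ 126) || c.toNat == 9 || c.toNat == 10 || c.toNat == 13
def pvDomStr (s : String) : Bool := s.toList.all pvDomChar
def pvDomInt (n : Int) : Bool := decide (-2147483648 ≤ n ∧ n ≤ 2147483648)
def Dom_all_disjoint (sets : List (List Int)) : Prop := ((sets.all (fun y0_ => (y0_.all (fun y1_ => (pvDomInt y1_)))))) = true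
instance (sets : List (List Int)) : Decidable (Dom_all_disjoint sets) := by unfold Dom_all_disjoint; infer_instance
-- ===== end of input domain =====

-- B replaces A's element-by-element membership check (with early return) by a count-versus-union-size
-- comparison over the whole collection; objective: simpler.

-- ===== PORT A =====
-- inner 'for x in s' loop: returns none when the early 'return False' fires, else the updated set
def adInner (seen : PySem.Set Int) : List Int → Option (PySem.Set Int)
  | [] => some seen
  | x :: xs =>
    if PySem.Set.contains seen x then none
    else adInner (PySem.Set.add seen x) xs

-- outer 'for s in sets' loop
def adOuter (seen : PySem.Set Int) : List (List Int) → Bool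
  | [] => true
  | s :: rest =>
    match adInner seen s with
    | none => false
    | some seen' => adOuter seen' rest

def all_disjoint (sets : List (List Int)) : Bool :=
  adOuter PySem.Set.empty sets

-- ===== PORT B =====
def all_disjoint_alt (sets : List (List Int)) : Bool :=
  let total : Int := sets.foldl (fun acc s => acc + PySem.List.len s) 0
  let u : PySem.Set Int := sets.foldl (fun u s => PySem.Set.update u s) PySem.Set.empty
  total == PySem.List.len u

-- ===== PRECONDITION & SPEC =====
def Spec_all_disjoint (sets : List (List Int)) (out : Bool) : Prop := out = all_disjoint_alt sets
instance (sets : List (List Int)) (out : Bool) : Decidable (Spec_all_disjoint sets out) := by unfold Spec_all_disjoint; infer_instance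

-- ===== CLAIM (what is proved, stated in full; the proofs are below) =====
def Claim_equal_all_disjoint : Prop := ∀ (sets : List (List Int)), Dom_all_disjoint sets → Spec_all_disjoint sets (all_disjoint sets)

-- ===== LEMMAS AND PROOFS =====

-- A's inner loop: fails iff appending s to the seen elements creates a duplicate
theorem adInner_eq (s : List Int) : ∀ (seen : PySem.Set Int), seen.Nodup →
    adInner seen s = (if (seen ++ s).Nodup then some (seen ++ s) else none) := by
  induction s with
  | nil => intro seen h; simp [adInner, h]
  | cons x xs ih =>
    intro seen h
    by_cases hx : x ∈ seen
    · have hcon : PySem.Set.contains seen x = true := by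
        simpa [PySem.Set.contains_iff] using hx
      have hnd : ¬ (seen ++ x :: xs).Nodup := by
        intro hnd
        rcases List.nodup_append.mp hnd with ⟨_, _, hdisj⟩
        exact hdisj x hx x List.mem_cons_self rfl
      simp [adInner, hnd]
      exact fun h' => absurd hx h'
    · have hcon : PySem.Set.contains seen x = false := by
        simpa [PySem.Set.contains_iff] using hx
      have hadd : PySem.Set.add seen x = seen ++ [x] :=
        PySem.Set.add_of_not_mem hx
      have hnd1 : (seen ++ [x]).Nodup := by
        rw [List.nodup_append]
        refine ⟨h, List.nodup_singleton x, ?_⟩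
        intro a ha b hb heq
        rw [List.mem_singleton] at hb
        subst hb
        exact hx (heq ▸ ha)
      have := ih (seen ++ [x]) hnd1
      simp only [adInner, hcon, Bool.false_eq_true, if_false, hadd, this,
        List.append_assoc, List.singleton_append]

-- A's outer loop computes nodup-ness of seen ++ flatten
theorem adOuter_eq : ∀ (ls : List (List Int)) (seen : PySem.Set Int), seen.Nodup →
    adOuter seen ls = decide ((seen ++ ls.flatten).Nodup) := by
  intro ls
  induction ls with
  | nil => intro seen h; simp [adOuter, h]
  | cons s rest ih =>
    intro seen h
    rw [show adOuter seen (s :: rest) = (match adInner seen s with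
          | none => false
          | some seen' => adOuter seen' rest) from rfl,
        adInner_eq s seen h]
    by_cases h1 : (seen ++ s).Nodup
    · rw [if_pos h1]
      show adOuter (seen ++ s) rest = _
      rw [ih (seen ++ s) h1]
      simp only [List.flatten_cons, List.append_assoc]
      rfl
    · rw [if_neg h1]
      have h2 : ¬ (seen ++ (s :: rest).flatten).Nodup := by
        intro hnd
        apply h1
        have he : (seen ++ (s :: rest).flatten) = ((seen ++ s) ++ rest.flatten) := by
          simp [List.flatten_cons, List.append_assoc]
        rw [he] at hnd
        exact hnd.of_append_left
      simp only [List.flatten_cons] at h2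
      simp [h2]

-- union size equals total length iff no duplicates
theorem length_ofList_eq_iff (xs : List Int) :
    (PySem.Set.ofList xs).length = xs.length ↔ xs.Nodup := by
  induction xs using List.reverseRecOn with
  | nil => simp [PySem.Set.ofList_nil]
  | append_singleton ys y ih =>
    rw [PySem.Set.ofList_append_singleton]
    by_cases hy : y ∈ ys
    · have hmem : y ∈ PySem.Set.ofList ys := (PySem.Set.mem_ofList _ _).mpr hy
      rw [PySem.Set.add_of_mem hmem]
      constructor
      · intro hlen
        exfalso
        have hle := PySem.Set.length_ofList_le (xs := ys)
        simp [List.length_append] at hlen; omega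
      · intro hnd
        exfalso
        rcases List.nodup_append.mp hnd with ⟨_, _, hdisj⟩
        exact hdisj y hy y (List.mem_singleton.mpr rfl) rfl
    · have hmem : y ∉ PySem.Set.ofList ys := fun h => hy ((PySem.Set.mem_ofList _ _).mp h)
      rw [PySem.Set.add_of_not_mem hmem]
      have hnd : (ys ++ [y]).Nodup ↔ ys.Nodup := by
        rw [List.nodup_append]
        constructor
        · exact fun ⟨a, _, _⟩ => a
        · intro hys
          refine ⟨hys, List.nodup_singleton y, ?_⟩
          intro a ha b hb heq
          rw [List.mem_singleton] at hb
          subst hb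
          exact hy (heq ▸ ha)
      simp only [List.length_append, List.length_singleton, hnd, ← ih]
      omega

-- B's first pass: the total count is the length of the flattened input
theorem total_eq (sets : List (List Int)) : ∀ (acc : Int),
    sets.foldl (fun acc s => acc + PySem.List.len s) acc = acc + (sets.flatten.length : Int) := by
  induction sets with
  | nil => intro acc; simp
  | cons s rest ih =>
    intro acc
    rw [List.foldl_cons, ih, List.flatten_cons]
    simp only [PySem.List.len_eq, List.length_append]
    push_cast
    ring

-- B's second pass: the accumulated union is the set of the flattened input
theorem union_eq (sets : List (List Int)) : ∀ (acc : PySem.Set Int),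
    sets.foldl (fun u s => PySem.Set.update u s) acc = PySem.Set.update acc sets.flatten := by
  induction sets with
  | nil => intro acc; simp [PySem.Set.update]
  | cons s rest ih =>
    intro acc
    simp only [List.foldl_cons, ih, List.flatten_cons, PySem.Set.update_append]

theorem alt_eq (sets : List (List Int)) :
    all_disjoint_alt sets = decide (sets.flatten.Nodup) := by
  unfold all_disjoint_alt
  rw [total_eq, union_eq]
  have hu : PySem.Set.update PySem.Set.empty sets.flatten = PySem.Set.ofList sets.flatten := by
    simp [PySem.Set.empty, PySem.Set.update_nil_left]
  rw [hu]
  show (((0 : Int) + (sets.flatten.length : Int)) == PySem.List.len (PySem.Set.ofList sets.flatten))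
      = decide sets.flatten.Nodup
  rw [PySem.List.len_eq]
  by_cases hnd : sets.flatten.Nodup
  · rw [(length_ofList_eq_iff _).mpr hnd]
    simp [hnd]
  · have hne : (PySem.Set.ofList sets.flatten).length ≠ sets.flatten.length :=
      fun hc => hnd ((length_ofList_eq_iff _).mp hc)
    simp only [hnd, decide_false]
    rw [beq_eq_false_iff_ne]
    intro hc
    exact hne (by omega)

-- ===== VERDICT (by name: the statement is the Claim_ definition above) =====
theorem all_disjoint_spec : Claim_equal_all_disjoint := by
  intro sets _
  unfold Spec_all_disjoint all_disjoint
  rw [adOuter_eq sets PySem.Set.empty (by simp [PySem.Set.empty]), alt_eq]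
  simp [PySem.Set.empty]
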